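-- pv_equiv track=rewrite | github.com/Howard1x5/argus | src/argus/parsers/iis.py | _split_iis_line
-- ===== SOURCE A (Python) =====
-- def _split_iis_line(line: str) -> list:
--     """Split IIS log line handling quoted strings and empty fields.
--
--     IIS logs use double-quotes for fields containing spaces (like User-Agent).
--     Empty fields are represented as '-' or double spaces.
--     """
--     values = []
--     current = []
--     in_quotes = False
--     i = 0
--
--     # Handle empty query string (double space before port)
--     line = line.replace("  ", " - ")
--
--     while i < len(line):
--         char = line[i]
--
--         if char == '"':
--             in_quotes = not in_quotes
--         elif char == ' ' and not in_quotes: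
--             if current:
--                 values.append(''.join(current))
--                 current = []
--         else:
--             current.append(char)
--         i += 1
--
--     # Don't forget the last value
--     if current:
--         values.append(''.join(current))
--
--     return values
-- ===== SOURCE B (Python) =====
-- def _split_iis_line(line: str) -> list:
--     """Split IIS log line handling quoted strings and empty fields.
--
--     Same output as the char-scan version, but built from str.split (faster in CPython):
--     split on '"' (odd segments are quoted text), split even segments on ' '.
--     """
--     line = line.replace("  ", " - ")
--     result = []
--     current = ""
--     for i, part in enumerate(line.split('"')):
--         if i % 2 == 1:
--             current += part
--         else:
--             words = part.split(' ')
--             current += words[0]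
--             for w in words[1:]:
--                 if current:
--                     result.append(current)
--                 current = w
--     if current:
--         result.append(current)
--     return result
-- ===== Notes on version B (the rewrite author's own statement) =====
-- stated objective: faster
-- what changed: Replaces A's per-character in_quotes state machine with a decomposition built from str.split: split the line at double-quote characters (odd segments are quoted text) and split the unquoted segments at spaces, flushing fields at word boundaries.
import Mathlib
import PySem

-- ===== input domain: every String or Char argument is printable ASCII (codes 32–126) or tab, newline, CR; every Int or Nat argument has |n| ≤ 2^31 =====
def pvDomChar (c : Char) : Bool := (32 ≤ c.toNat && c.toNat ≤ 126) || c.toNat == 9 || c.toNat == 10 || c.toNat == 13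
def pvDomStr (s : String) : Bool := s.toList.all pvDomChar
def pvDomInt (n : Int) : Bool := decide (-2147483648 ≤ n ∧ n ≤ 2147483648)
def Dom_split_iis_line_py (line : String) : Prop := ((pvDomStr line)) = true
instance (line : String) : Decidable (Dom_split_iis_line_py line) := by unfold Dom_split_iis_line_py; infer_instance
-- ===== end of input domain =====

-- B replaces A's per-character in_quotes state machine by a decomposition built from
-- str.split: split at double quotes, then split the unquoted segments at spaces
-- (same O(n), measurably faster in Python via C-level str.split).

-- ===== PORT A =====
-- the while loop over line[i] with state (values, current, in_quotes)
def pvALoop (cs : List Char) (values : List String) (current : List Char) (inQuotes : Bool) : List String :=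
  match cs with
  | [] => if current = [] then values else values ++ [String.mk current]
  | c :: rest =>
    if c = '"' then pvALoop rest values current (!inQuotes)
    else if c = ' ' ∧ inQuotes = false then
      if current = [] then pvALoop rest values [] inQuotes
      else pvALoop rest (values ++ [String.mk current]) [] inQuotes
    else pvALoop rest values (current ++ [c]) inQuotes

def split_iis_line_py (line : String) : List String :=
  pvALoop (PySem.Str.replace line "  " " - ").toList [] [] false

-- ===== PORT B =====
-- the inner `for w in words[1:]` loop
def pvBWords (words : List (List Char)) (result : List String) (current : List Char) : List String × List Char :=
  match words with
  | [] => (result, current)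
  | w :: rest => pvBWords rest (if current = [] then result else result ++ [String.mk current]) w

-- the `for i, part in enumerate(...)` loop
def pvBParts (parts : List (Int × List Char)) (result : List String) (current : List Char) : List String × List Char :=
  match parts with
  | [] => (result, current)
  | (i, part) :: rest =>
    if PySem.Int.mod i 2 = 1 then pvBParts rest result (current ++ part)
    else
      let ws := PySem.Chars.splitOn part [' ']
      let rc := pvBWords ws.tail result (current ++ ws.headI)
      pvBParts rest rc.1 rc.2

def split_iis_line_py_alt (line : String) : List String :=
  let cs := (PySem.Str.replace line "  " " - ").toList
  let rc := pvBParts (PySem.List.enumerate (PySem.Chars.splitOn cs ['"']) 0) [] []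
  if rc.2 = [] then rc.1 else rc.1 ++ [String.mk rc.2]

-- ===== PRECONDITION & SPEC =====
def Spec_split_iis_line_py (line : String) (out : List String) : Prop := out = split_iis_line_py_alt line
instance (line : String) (out : List String) : Decidable (Spec_split_iis_line_py line out) := by unfold Spec_split_iis_line_py; infer_instance

-- ===== CLAIM (what is proved, stated in full; the proofs are below) =====
def Claim_equal_split_iis_line_py : Prop := ∀ (line : String), Dom_split_iis_line_py line → Spec_split_iis_line_py line (split_iis_line_py line)

-- ===== LEMMAS AND PROOFS =====

-- a structural version of s.split(c) for a single-char separator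
def pvSp (c : Char) : List Char → List (List Char)
  | [] => [[]]
  | x :: xs => if x = c then [] :: pvSp c xs else (x :: (pvSp c xs).headI) :: (pvSp c xs).tail

theorem pvSp_ne_nil (c : Char) (l : List Char) : pvSp c l ≠ [] := by
  cases l with
  | nil => simp [pvSp]
  | cons x xs => simp only [pvSp]; split <;> simp

theorem pvGo_spec (c : Char) : ∀ (fuel : Nat) (l cur : List Char) (acc : List (List Char)),
    l.length ≤ fuel →
    PySem.Chars.splitOn.go [c] fuel l cur acc
      = acc.reverse ++ ((cur.reverse ++ (pvSp c l).headI) :: (pvSp c l).tail) := by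
  intro fuel
  induction fuel with
  | zero =>
    intro l cur acc h
    have : l = [] := by cases l <;> simp_all
    subst this
    simp [PySem.Chars.splitOn.go, pvSp]
  | succ f ih =>
    intro l cur acc h
    cases l with
    | nil => simp [PySem.Chars.splitOn.go, pvSp]
    | cons x xs =>
      by_cases hx : x = c
      · subst hx
        have hpre : [x].isPrefixOf (x :: xs) = true := by simp [List.isPrefixOf]
        rw [PySem.Chars.splitOn.go]
        simp only [hpre, if_true]
        rw [show List.drop [x].length (x :: xs) = xs from rfl]
        rw [ih xs [] (cur.reverse :: acc) (by simpa using Nat.le_of_succ_le_succ h)]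
        obtain ⟨h0, ht, hsp⟩ : ∃ h0 ht, pvSp x xs = h0 :: ht := by
          cases hsp : pvSp x xs with
          | nil => exact absurd hsp (pvSp_ne_nil _ _)
          | cons a t => exact ⟨a, t, rfl⟩
        simp [pvSp, hsp]
      · rw [PySem.Chars.splitOn.go]
        have hpre : [c].isPrefixOf (x :: xs) = false := by
          simp [List.isPrefixOf]; exact fun hxc => absurd hxc.symm hx
        simp only [hpre, if_false, Bool.false_eq_true]
        rw [ih xs (x :: cur) acc (by simpa using Nat.le_of_succ_le_succ h)]
        simp [pvSp, hx]

theorem pvSplitOn_eq_sp (c : Char) (l : List Char) :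
    PySem.Chars.splitOn l [c] = pvSp c l := by
  have h := pvGo_spec c (l.length + 1) l [] [] (by omega)
  simpa [PySem.Chars.splitOn] using
    h.trans (by cases hsp : pvSp c l with
      | nil => exact absurd hsp (pvSp_ne_nil c l)
      | cons a t => simp)

-- alternating (even/odd) recursion over the quote-split parts: the shape of B's loop
def pvAltB : List (List Char) → Bool → List String → List Char → List String × List Char
  | [], _, res, cur => (res, cur)
  | p :: ps, true, res, cur => pvAltB ps false res (cur ++ p)
  | p :: ps, false, res, cur =>
      let rc := pvBWords (pvSp ' ' p).tail res (cur ++ (pvSp ' ' p).headI)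
      pvAltB ps true rc.1 rc.2

theorem pvBParts_eq_altB : ∀ (ps : List (List Char)) (s : Int) (res : List String) (cur : List Char),
    pvBParts (PySem.List.enumerate ps s) res cur
      = pvAltB ps (decide (PySem.Int.mod s 2 = 1)) res cur := by
  intro ps
  induction ps with
  | nil => intro s res cur; simp [pvBParts, pvAltB, PySem.List.enumerate]
  | cons p ps ih =>
    intro s res cur
    rw [PySem.List.enumerate_cons]
    have h2 : PySem.Int.mod s 2 = s % 2 := PySem.Int.mod_eq_emod_of_pos (by omega)
    have h2' : PySem.Int.mod (s + 1) 2 = (s + 1) % 2 := PySem.Int.mod_eq_emod_of_pos (by omega)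
    rcases PySem.Int.mod_two_eq s with h | h
    · have hm : PySem.Int.mod (s + 1) 2 = 1 := by rw [h2']; rw [h2] at h; omega
      have hs : decide (PySem.Int.mod s 2 = 1) = false := by rw [h]; decide
      have hs' : decide (PySem.Int.mod (s + 1) 2 = 1) = true := by rw [hm]; decide
      rw [pvBParts, if_neg (by rw [h]; decide), ih, hs, hs']
      simp [pvAltB, pvSplitOn_eq_sp]
    · have hm : PySem.Int.mod (s + 1) 2 = 0 := by rw [h2']; rw [h2] at h; omega
      have hs : decide (PySem.Int.mod s 2 = 1) = true := by rw [h]; decide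
      have hs' : decide (PySem.Int.mod (s + 1) 2 = 1) = false := by rw [hm]; decide
      rw [pvBParts, if_pos h, ih, hs, hs']
      simp [pvAltB]

-- the heart: A's char scan equals the alternating parts recursion over pvSp '"'
theorem pvMain : ∀ (cs : List Char) (res : List String) (cur : List Char) (q : Bool),
    pvALoop cs res cur q
      = (let rc := pvAltB (pvSp '"' cs) q res cur;
         if rc.2 = [] then rc.1 else rc.1 ++ [String.mk rc.2]) := by
  intro cs
  induction cs with
  | nil =>
    intro res cur q
    cases q <;> simp [pvALoop, pvSp, pvAltB, pvBWords]
  | cons c rest ih =>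
    intro res cur q
    by_cases hq : c = '"'
    · subst hq
      rw [pvALoop, if_pos rfl]
      rw [ih]
      cases q <;> simp [pvSp, pvAltB, pvBWords]
    · obtain ⟨h0, ht⟩ : ∃ h0 ht, pvSp '"' rest = h0 :: ht := by
        cases hsp : pvSp '"' rest with
        | nil => exact absurd hsp (pvSp_ne_nil _ _)
        | cons a t => exact ⟨a, t, rfl⟩
      obtain ⟨ht, hrest⟩ := ht
      cases q with
      | true =>
        rw [pvALoop, if_neg hq, if_neg (by simp)]
        rw [ih]
        simp [pvSp, hq, hrest, pvAltB]
      | false =>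
        by_cases hc : c = ' '
        · subst hc
          rw [pvALoop, if_neg hq, if_pos ⟨rfl, rfl⟩]
          obtain ⟨w0, wt, hw⟩ : ∃ w0 wt, pvSp ' ' h0 = w0 :: wt := by
            cases hw : pvSp ' ' h0 with
            | nil => exact absurd hw (pvSp_ne_nil _ _)
            | cons a t => exact ⟨a, t, rfl⟩
          by_cases hcur : cur = []
          · rw [if_pos hcur, ih]
            simp [pvSp, hq, hrest, pvAltB, hw, pvBWords, hcur]
          · rw [if_neg hcur, ih]
            simp [pvSp, hq, hrest, pvAltB, hw, pvBWords, hcur]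
        · rw [pvALoop, if_neg hq, if_neg (by simp [hc])]
          rw [ih]
          simp [pvSp, hq, hrest, hc, pvAltB]

-- ===== VERDICT (by name: the statement is the Claim_ definition above) =====
theorem split_iis_line_py_spec : Claim_equal_split_iis_line_py := by
  intro line _
  unfold Spec_split_iis_line_py split_iis_line_py split_iis_line_py_alt
  rw [pvMain]
  have hd : decide (PySem.Int.mod 0 2 = 1) = false := by decide
  simp only [pvSplitOn_eq_sp, pvBParts_eq_altB, hd]
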